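-- pv_equiv track=rewrite | github.com/apple/ml-lucid-datagen | running_baseline/utils_eval_metrics.py | get_comma_split_points
-- ===== SOURCE A (Python) =====
-- def get_comma_split_points(command):
--
--     quotes_opened = False
--     comma_splits = []
--
--     for idx, char in enumerate(command):
--
--         if char == '"':
--             quotes_opened = not quotes_opened
--         if not quotes_opened and char == ",":
--             comma_splits.append(idx)
--
--     return comma_splits
-- ===== SOURCE B (Python) =====
-- def get_comma_split_points(command):
--     parts = command.split('"')
--     result = []
--     offset = 0
--     for i, part in enumerate(parts):
--         if i % 2 == 0:
--             for j, ch in enumerate(part):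
--                 if ch == ',':
--                     result.append(offset + j)
--         offset += len(part) + 1
--     return result
-- ===== Notes on version B (the rewrite author's own statement) =====
-- stated objective: alternative
-- what changed: B splits the string at the double-quote character and collects comma positions only from the even-indexed (outside-quotes) segments with a running offset, instead of A's per-character quote-state toggle.
import Mathlib
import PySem

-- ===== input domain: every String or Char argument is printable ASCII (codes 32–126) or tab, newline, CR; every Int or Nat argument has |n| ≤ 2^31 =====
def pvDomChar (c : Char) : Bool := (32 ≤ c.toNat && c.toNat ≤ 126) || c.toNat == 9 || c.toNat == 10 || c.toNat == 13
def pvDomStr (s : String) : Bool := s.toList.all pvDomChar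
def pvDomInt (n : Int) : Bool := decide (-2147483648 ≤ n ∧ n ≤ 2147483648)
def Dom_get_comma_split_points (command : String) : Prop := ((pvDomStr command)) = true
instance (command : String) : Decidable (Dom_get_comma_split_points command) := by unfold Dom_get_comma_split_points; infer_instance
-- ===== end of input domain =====

-- B splits the string at the double-quote character and collects comma positions from the
-- even-indexed (outside-quotes) segments with a running offset, instead of A's per-character
-- quote-state toggle (objective: alternative decomposition).


-- ===== PORT A =====
-- the for-loop over enumerate(command) with state (quotes_opened, comma_splits)
def pvAloop : List (Int × Char) → Bool → List Int → List Int
  | [], _, acc => acc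
  | (idx, c) :: rest, q, acc =>
    let q' := if c = '"' then !q else q
    let acc' := if (!q') && (c = ',') then acc ++ [idx] else acc
    pvAloop rest q' acc'

def get_comma_split_points (command : String) : List Int :=
  pvAloop (PySem.List.enumerate command.toList 0) false []

-- ===== PORT B =====
-- inner loop of Source B: commas of one part, positions offset by off
def pvCommas : List Char → Int → List Int
  | [], _ => []
  | c :: rest, off => (if c = ',' then [off] else []) ++ pvCommas rest (off + 1)

-- outer loop of Source B over the parts; `ev` is `i % 2 == 0`
def pvBloop : List (List Char) → Int → Bool → List Int
  | [], _, _ => []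
  | p :: ps, off, ev =>
    (if ev then pvCommas p off else []) ++ pvBloop ps (off + (p.length : Int) + 1) (!ev)

def get_comma_split_points_alt (command : String) : List Int :=
  pvBloop (PySem.Chars.splitOn command.toList ['"']) 0 true

-- ===== PRECONDITION & SPEC =====
def Spec_get_comma_split_points (command : String) (out : List Int) : Prop := out = get_comma_split_points_alt command
instance (command : String) (out : List Int) : Decidable (Spec_get_comma_split_points command out) := by unfold Spec_get_comma_split_points; infer_instance

-- ===== CLAIM (what is proved, stated in full; the proofs are below) =====
def Claim_equal_get_comma_split_points : Prop := ∀ (command : String), Dom_get_comma_split_points command → Spec_get_comma_split_points command (get_comma_split_points command)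

-- ===== LEMMAS AND PROOFS =====

-- structural version of split-on-'"' used only inside the proofs
def pvConsHead (c : Char) : List (List Char) → List (List Char)
  | [] => [[c]]
  | p :: ps => (c :: p) :: ps

def pvSplit : List Char → List (List Char)
  | [] => [[]]
  | c :: cs => if c = '"' then [] :: pvSplit cs else pvConsHead c (pvSplit cs)

def pvPrepend (pre : List Char) : List (List Char) → List (List Char)
  | [] => [pre]
  | p :: ps => (pre ++ p) :: ps

theorem pvSplit_ne_nil (cs : List Char) : pvSplit cs ≠ [] := by
  cases cs with
  | nil => simp [pvSplit]
  | cons c cs =>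
    simp only [pvSplit]
    split_ifs
    · simp
    · cases h : pvSplit cs <;> simp [pvConsHead]

theorem splitOn_go_cons (f : Nat) (c : Char) (rest cur : List Char) (acc : List (List Char)) :
    PySem.Chars.splitOn.go ['"'] (f+1) (c :: rest) cur acc =
      if c = '"' then PySem.Chars.splitOn.go ['"'] f rest [] (cur.reverse :: acc)
      else PySem.Chars.splitOn.go ['"'] f rest (c :: cur) acc := by
  rw [PySem.Chars.splitOn.go]
  by_cases h : c = '"' <;> simp [List.isPrefixOf, h]
  · intro h'; exact absurd h'.symm h

theorem splitOn_go_nil (f : Nat) (cur : List Char) (acc : List (List Char)) :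
    PySem.Chars.splitOn.go ['"'] (f+1) [] cur acc = (cur.reverse :: acc).reverse := by
  rw [PySem.Chars.splitOn.go]
  simp

theorem splitOn_go_eq (f : Nat) : ∀ (l cur : List Char) (acc : List (List Char)),
    l.length < f →
    PySem.Chars.splitOn.go ['"'] f l cur acc = acc.reverse ++ pvPrepend cur.reverse (pvSplit l) := by
  induction f with
  | zero => intro l cur acc h; omega
  | succ f ih =>
    intro l cur acc h
    cases l with
    | nil => simp [splitOn_go_nil, pvSplit, pvPrepend]
    | cons c rest =>
      rw [splitOn_go_cons]
      by_cases hc : c = '"'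
      · simp only [hc]
        rw [ih rest [] (cur.reverse :: acc) (by simpa using Nat.lt_of_succ_lt_succ h)]
        cases hs : pvSplit rest with
        | nil => exact absurd hs (pvSplit_ne_nil rest)
        | cons p ps => simp [pvSplit, hs, pvPrepend]
      · rw [if_neg hc,
            ih rest (c :: cur) acc (by simpa using Nat.lt_of_succ_lt_succ h)]
        cases hs : pvSplit rest with
        | nil => exact absurd hs (pvSplit_ne_nil rest)
        | cons p ps => simp [pvSplit, hc, hs, pvPrepend, pvConsHead]

theorem splitOn_eq_pvSplit (cs : List Char) :
    PySem.Chars.splitOn cs ['"'] = pvSplit cs := by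
  show PySem.Chars.splitOn.go ['"'] (cs.length + 1) cs [] [] = pvSplit cs
  rw [splitOn_go_eq (cs.length + 1) cs [] [] (by omega)]
  cases hs : pvSplit cs with
  | nil => exact absurd hs (pvSplit_ne_nil cs)
  | cons p ps => simp [pvPrepend]

theorem pvAloop_eq_pvBloop : ∀ (cs : List Char) (i : Int) (q : Bool) (acc : List Int),
    pvAloop (PySem.List.enumerate cs i) q acc = acc ++ pvBloop (pvSplit cs) i (!q) := by
  intro cs
  induction cs with
  | nil => intro i q acc; simp [PySem.List.enumerate_nil, pvAloop, pvSplit, pvBloop, pvCommas]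
  | cons c cs ih =>
    intro i q acc
    rw [PySem.List.enumerate_cons]
    by_cases hc : c = '"'
    · subst hc
      simp only [pvAloop]
      norm_num
      rw [if_neg (fun h => absurd h.2 (by decide))]
      rw [ih (i + 1) (!q) acc]
      simp [pvSplit, pvBloop, pvCommas]
    · simp only [pvAloop, if_neg hc]
      rw [ih (i + 1) q _]
      cases hs : pvSplit cs with
      | nil => exact absurd hs (pvSplit_ne_nil cs)
      | cons p ps =>
        simp only [pvSplit, if_neg hc, hs, pvConsHead, pvBloop, pvCommas]
        cases q with
        | false =>
          by_cases hcm : c = ',' <;>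
            simp [hcm, List.append_assoc] <;>
            ring_nf
        | true =>
          simp
          ring_nf

-- ===== VERDICT (by name: the statement is the Claim_ definition above) =====
theorem get_comma_split_points_spec : Claim_equal_get_comma_split_points := by
  intro command _
  show get_comma_split_points command = get_comma_split_points_alt command
  unfold get_comma_split_points get_comma_split_points_alt
  rw [splitOn_eq_pvSplit, pvAloop_eq_pvBloop]
  simp
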